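-- pv_equiv track=rewrite | github.com/bashbash96/InterviewPreparation | LeetCode/googlePhone.py | confusingNum
-- ===== SOURCE A (Python) =====
-- SWAP = {0: 0, 1: 1, 6: 9, 8: 8, 9: 6}
--
-- def confusingNum(n):
--     nums = set()
--     res = []
--     for num in range(1, n + 1):
--         rev = reverseNum(num)
--         rev = swapNum(rev)
--         if rev:
--             if rev[0] == 0:
--                 nums.add(num)
--                 continue
--             temp = 0
--             for digit in rev:
--                 temp = temp * 10 + digit
--             if temp in nums:
--                 res.append([temp, num])
--         nums.add(num)
--
--     return res
--
-- def reverseNum(num):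
--     rev = []
--     while num > 0:
--         rev.append(num % 10)
--         num //= 10
--     return rev
--
-- def swapNum(num):
--     for i in range(len(num)):
--         digit = num[i]
--         if digit not in SWAP:
--             return []
--         num[i] = SWAP[digit]
--     return num
-- ===== SOURCE B (Python) =====
-- def confusingNum(n):
--     """Generate only numbers built from rotatable digits, level by level
--     (by digit count), instead of scanning every number in 1..n."""
--     res = []
--     level = [c for c in (1, 6, 8, 9) if c <= n]
--     p = 1  # 10 ** (current digit count - 1)
--     while p <= n:
--         for num in level:
--             rot = 0
--             m = num
--             while m > 0:
--                 d = m % 10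
--                 rot = rot * 10 + (9 if d == 6 else 6 if d == 9 else d)
--                 m //= 10
--             if num % 10 != 0 and rot < num:
--                 res.append([rot, num])
--         level = [num * 10 + d for num in level for d in (0, 1, 6, 8, 9) if num * 10 + d <= n]
--         p *= 10
--     return res
-- ===== Notes on version B (the rewrite author's own statement) =====
-- stated objective: faster
-- what changed: B abandons A's scan of every number in 1..n (with a seen-set and per-number list passes); it generates only the candidates whose every digit is rotatable, level by digit count, computes each candidate's rotation arithmetically, and keeps the pair when the candidate does not end in zero and its rotation is smaller, which yields A's exact ascending order without any sort.
import Mathlib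
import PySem

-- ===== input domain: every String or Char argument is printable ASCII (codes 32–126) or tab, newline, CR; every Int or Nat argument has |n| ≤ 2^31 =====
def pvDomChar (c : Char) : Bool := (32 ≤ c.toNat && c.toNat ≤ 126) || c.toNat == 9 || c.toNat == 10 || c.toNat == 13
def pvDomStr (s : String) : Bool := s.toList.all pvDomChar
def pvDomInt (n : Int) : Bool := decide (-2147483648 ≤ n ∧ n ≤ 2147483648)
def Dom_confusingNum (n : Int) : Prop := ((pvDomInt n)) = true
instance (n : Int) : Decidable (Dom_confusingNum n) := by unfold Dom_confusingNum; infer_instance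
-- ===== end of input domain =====

-- B replaces A's scan of every number in 1..n by level-by-level generation of
-- only the numbers built from rotatable digits (objective: faster).

-- ===== PORT A =====
def SWAP : PySem.Dict Int Int := PySem.Dict.ofList [(0, 0), (1, 1), (6, 9), (8, 8), (9, 6)]

def reverseNumAux (num : Int) (rev : List Int) : List Int :=
  if 0 < num then
    reverseNumAux (PySem.Int.floordiv num 10) (rev ++ [PySem.Int.mod num 10])
  else rev
termination_by num.toNat
decreasing_by
  rw [PySem.Int.floordiv_eq_ediv_of_pos (by norm_num)]
  omega

def reverseNum (num : Int) : List Int := reverseNumAux num []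

def swapNumAux : List Int → List Int → List Int
  | [], acc => acc
  | d :: rest, acc =>
    if PySem.Dict.contains SWAP d then
      swapNumAux rest (acc ++ [PySem.Dict.getD SWAP d 0])
    else []

def swapNum (num : List Int) : List Int := swapNumAux num []

def confusingNumStep (st : PySem.Set Int × List (List Int)) (num : Int) :
    PySem.Set Int × List (List Int) :=
  let nums := st.1
  let res := st.2
  let rev := swapNum (reverseNum num)
  match rev with
  | [] => (PySem.Set.add nums num, res)
  | d0 :: _ =>
    if d0 = 0 then (PySem.Set.add nums num, res)
    else
      let temp := rev.foldl (fun t d => t * 10 + d) 0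
      if PySem.Set.contains nums temp then
        (PySem.Set.add nums num, res ++ [[temp, num]])
      else
        (PySem.Set.add nums num, res)

def confusingNum (n : Int) : List (List Int) :=
  ((PySem.List.pyRange 1 (n + 1) 1).foldl confusingNumStep ((PySem.Set.empty : PySem.Set Int), [])).2

-- ===== PORT B =====
-- the inner 'while m > 0' rotation loop of Source B (digits are known rotatable)
def rotBAux (m rot : Int) : Int :=
  if 0 < m then
    rotBAux (PySem.Int.floordiv m 10)
      (rot * 10 + (if PySem.Int.mod m 10 = 6 then 9
                   else if PySem.Int.mod m 10 = 9 then 6 else PySem.Int.mod m 10))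
  else rot
termination_by m.toNat
decreasing_by
  rw [PySem.Int.floordiv_eq_ediv_of_pos (by norm_num)]
  omega

-- 'for num in level: … if num % 10 != 0 and rot < num: res.append([rot, num])'
def processLevel (res : List (List Int)) (level : List Int) : List (List Int) :=
  level.foldl
    (fun r num =>
      if PySem.Int.mod num 10 ≠ 0 ∧ rotBAux num 0 < num then r ++ [[rotBAux num 0, num]] else r)
    res

-- 'level = [num * 10 + d for num in level for d in (0, 1, 6, 8, 9) if num * 10 + d <= n]'
def nextLevel (n : Int) (level : List Int) : List Int :=
  level.flatMap (fun num =>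
    ([0, 1, 6, 8, 9] : List Int).filterMap
      (fun d => if num * 10 + d ≤ n then some (num * 10 + d) else none))

-- 'while p <= n: … p *= 10'  (hp is a ghost invariant used only for termination)
def levelLoop (n p : Int) (hp : 1 ≤ p) (level : List Int) (res : List (List Int)) :
    List (List Int) :=
  if h : p ≤ n then
    levelLoop n (p * 10) (by omega) (nextLevel n level) (processLevel res level)
  else res
termination_by (n + 1 - p).toNat
decreasing_by omega

def confusingNum_alt (n : Int) : List (List Int) :=
  levelLoop n 1 (by norm_num) (([1, 6, 8, 9] : List Int).filter (fun c => decide (c ≤ n))) []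

-- ===== PRECONDITION & SPEC =====
def Spec_confusingNum (n : Int) (out : List (List Int)) : Prop := out = confusingNum_alt n
instance (n : Int) (out : List (List Int)) : Decidable (Spec_confusingNum n out) := by
  unfold Spec_confusingNum; infer_instance

-- ===== CLAIM (what is proved, stated in full; the proofs are below) =====
def Claim_equal_confusingNum : Prop := ∀ (n : Int), Dom_confusingNum n → Spec_confusingNum n (confusingNum n)

-- ===== LEMMAS AND PROOFS =====

-- ---- A-side: A's fold equals a scan with a per-number step (altStep) ----

-- proof-side arithmetic rotation with validity check (characterises A's rev/swap/fold chain)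
def rotateAux (num rot : Int) : Option Int :=
  if 0 < num then
    let d := PySem.Int.mod num 10
    if d = 2 ∨ d = 3 ∨ d = 4 ∨ d = 5 ∨ d = 7 then none
    else rotateAux (PySem.Int.floordiv num 10)
      (rot * 10 + (if d = 6 then 9 else if d = 9 then 6 else d))
  else some rot
termination_by num.toNat
decreasing_by
  rw [PySem.Int.floordiv_eq_ediv_of_pos (by norm_num)]
  omega

def rotate (num : Int) : Option Int := rotateAux num 0

def altStep (res : List (List Int)) (num : Int) : List (List Int) :=
  if PySem.Int.mod num 10 ≠ 0 then
    match rotate num with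
    | some rot => if rot < num then res ++ [[rot, num]] else res
    | none => res
  else res

-- proof-side pure version of swapNum (none = some digit invalid)
def swapOpt : List Int → Option (List Int)
  | [] => some []
  | d :: rest =>
    if PySem.Dict.contains SWAP d then
      (swapOpt rest).map (PySem.Dict.getD SWAP d 0 :: ·)
    else none

theorem swapNumAux_eq (l : List Int) : ∀ acc,
    swapNumAux l acc = match swapOpt l with | none => [] | some m => acc ++ m := by
  induction l with
  | nil => intro acc; simp [swapNumAux, swapOpt]
  | cons d rest ih =>
    intro acc
    simp only [swapNumAux, swapOpt]
    by_cases h : PySem.Dict.contains SWAP d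
    · simp only [h, if_true, ih]
      cases swapOpt rest <;> simp
    · simp [h]

theorem reverseNumAux_acc (k : Nat) : ∀ (num : Int), num.toNat = k →
    ∀ rev, reverseNumAux num rev = rev ++ reverseNumAux num [] := by
  induction k using Nat.strong_induction_on with
  | _ k ih =>
    intro num hk rev
    by_cases h : 0 < num
    · have hfd : (PySem.Int.floordiv num 10).toNat < k := by
        rw [PySem.Int.floordiv_eq_ediv_of_pos (by norm_num)]
        omega
      conv_lhs => rw [reverseNumAux]
      conv_rhs => rw [reverseNumAux]
      simp only [h, if_true]
      rw [ih _ hfd _ rfl (rev ++ [PySem.Int.mod num 10]),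
          ih _ hfd _ rfl ([] ++ [PySem.Int.mod num 10])]
      simp
    · conv_lhs => rw [reverseNumAux]
      conv_rhs => rw [reverseNumAux]
      simp [h]

theorem reverseNum_pos {num : Int} (h : 0 < num) :
    reverseNum num = PySem.Int.mod num 10 :: reverseNum (PySem.Int.floordiv num 10) := by
  unfold reverseNum
  rw [reverseNumAux]
  simp only [h, if_true, List.nil_append]
  rw [reverseNumAux_acc (PySem.Int.floordiv num 10).toNat _ rfl]
  rfl

theorem reverseNum_nonpos {num : Int} (h : ¬ 0 < num) : reverseNum num = [] := by
  unfold reverseNum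
  rw [reverseNumAux]
  simp [h]

theorem rotateAux_eq (k : Nat) : ∀ (num : Int), num.toNat = k → ∀ rot,
    rotateAux num rot
      = (swapOpt (reverseNum num)).map (fun m => m.foldl (fun t d => t * 10 + d) rot) := by
  induction k using Nat.strong_induction_on with
  | _ k ih =>
    intro num hk rot
    by_cases h : 0 < num
    · have hfd : (PySem.Int.floordiv num 10).toNat < k := by
        rw [PySem.Int.floordiv_eq_ediv_of_pos (by norm_num)]
        omega
      have h0 : 0 ≤ PySem.Int.mod num 10 := PySem.Int.mod_nonneg num (by norm_num)
      have h10 : PySem.Int.mod num 10 < 10 := PySem.Int.mod_lt num (by norm_num)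
      rw [reverseNum_pos h, rotateAux]
      simp only [h, if_true]
      have hcases : PySem.Int.mod num 10 = 0 ∨ PySem.Int.mod num 10 = 1 ∨
          PySem.Int.mod num 10 = 2 ∨ PySem.Int.mod num 10 = 3 ∨ PySem.Int.mod num 10 = 4 ∨
          PySem.Int.mod num 10 = 5 ∨ PySem.Int.mod num 10 = 6 ∨ PySem.Int.mod num 10 = 7 ∨
          PySem.Int.mod num 10 = 8 ∨ PySem.Int.mod num 10 = 9 := by omega
      have hS : SWAP = PySem.Dict.mk [(0, 0), (1, 1), (6, 9), (8, 8), (9, 6)] := by decide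
      rcases hcases with h' | h' | h' | h' | h' | h' | h' | h' | h' | h' <;>
        rw [h'] <;>
        rw [ih _ hfd _ rfl] <;>
        norm_num [swapOpt, hS, PySem.Dict.getD_eq_get?_getD, PySem.Dict.get?_mk_cons] <;>
        first
          | rfl
          | (congr 1
             funext m
             simp [List.foldl])
    · rw [reverseNum_nonpos h, rotateAux]
      simp [h, swapOpt]

theorem getD_SWAP_cases (d : Int) :
    PySem.Dict.getD SWAP d 0 = 0 ∨ PySem.Dict.getD SWAP d 0 = 1 ∨ PySem.Dict.getD SWAP d 0 = 9 ∨
    PySem.Dict.getD SWAP d 0 = 8 ∨ PySem.Dict.getD SWAP d 0 = 6 := by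
  have hS : SWAP = PySem.Dict.mk [(0, 0), (1, 1), (6, 9), (8, 8), (9, 6)] := by decide
  rw [hS, PySem.Dict.getD_eq_get?_getD]
  simp only [PySem.Dict.get?_mk_cons]
  split_ifs <;> simp [PySem.Dict.get?]

theorem swapOpt_mem : ∀ {l m : List Int}, swapOpt l = some m →
    ∀ x ∈ m, x = 0 ∨ x = 1 ∨ x = 6 ∨ x = 8 ∨ x = 9 := by
  intro l
  induction l with
  | nil => intro m hm x hx; simp [swapOpt] at hm; subst hm; simp at hx
  | cons d rest ih =>
    intro m hm x hx
    simp only [swapOpt] at hm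
    by_cases h : PySem.Dict.contains SWAP d
    · simp only [h, if_true, Option.map_eq_some_iff] at hm
      obtain ⟨m', hm', rfl⟩ := hm
      rw [List.mem_cons] at hx
      rcases hx with rfl | hx
      · have := getD_SWAP_cases d
        omega
      · exact ih hm' x hx
    · simp [h] at hm

theorem foldl_pos : ∀ (l : List Int) (t : Int), 1 ≤ t →
    (∀ x ∈ l, 0 ≤ x) → 1 ≤ l.foldl (fun t d => t * 10 + d) t := by
  intro l
  induction l with
  | nil => intro t ht _; simpa using ht
  | cons d rest ih =>
    intro t ht hall
    simp only [List.foldl]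
    exact ih _ (by have := hall d (by simp); omega) (fun x hx => hall x (by simp [hx]))

-- the per-number step: A's step is the scan step plus the seen-set update, given the invariant
theorem step_eq (a : Int) (ha : 1 ≤ a) (S : PySem.Set Int) (res : List (List Int))
    (hS : ∀ x : Int, PySem.Set.contains S x = true ↔ 1 ≤ x ∧ x < a) :
    confusingNumStep (S, res) a = (PySem.Set.add S a, altStep res a) := by
  have hpos : 0 < a := ha
  have hrot := rotateAux_eq a.toNat a rfl 0
  have hswap := swapNumAux_eq (reverseNum a) []
  have h0 : 0 ≤ PySem.Int.mod a 10 := PySem.Int.mod_nonneg a (by norm_num)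
  have h10 : PySem.Int.mod a 10 < 10 := PySem.Int.mod_lt a (by norm_num)
  rw [reverseNum_pos hpos] at hrot hswap
  unfold confusingNumStep altStep rotate
  cases hso : swapOpt (PySem.Int.mod a 10 :: reverseNum (PySem.Int.floordiv a 10)) with
  | none =>
    rw [hso] at hrot hswap
    simp only [Option.map_none] at hrot
    rw [reverseNum_pos hpos]
    simp only [swapNum, hswap, hrot]
    split <;> simp
  | some m =>
    rw [hso] at hrot hswap
    simp only [Option.map_some] at hrot
    have hm : PySem.Dict.contains SWAP (PySem.Int.mod a 10) = true ∧
        ∃ m', m = PySem.Dict.getD SWAP (PySem.Int.mod a 10) 0 :: m'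
        ∧ swapOpt (reverseNum (PySem.Int.floordiv a 10)) = some m' := by
      have h2 := hso
      rw [swapOpt] at h2
      cases hx : PySem.Dict.contains SWAP (PySem.Int.mod a 10) with
      | false =>
        rw [if_neg (by rw [hx]; simp)] at h2
        exact absurd h2 (by simp)
      | true =>
        rw [if_pos hx, Option.map_eq_some_iff] at h2
        obtain ⟨m', h1, h2'⟩ := h2
        exact ⟨rfl, m', h2'.symm, h1⟩
    obtain ⟨hcont, m', hmeq, hm'⟩ := hm
    rw [reverseNum_pos hpos]
    simp only [swapNum, hswap, List.nil_append]
    subst hmeq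
    set s0 := PySem.Dict.getD SWAP (PySem.Int.mod a 10) 0 with hs0
    by_cases hz : s0 = 0
    · have hd0 : PySem.Int.mod a 10 = 0 := by
        rw [hs0] at hz
        have hc : PySem.Int.mod a 10 = 0 ∨ PySem.Int.mod a 10 = 1 ∨ PySem.Int.mod a 10 = 2 ∨
               PySem.Int.mod a 10 = 3 ∨ PySem.Int.mod a 10 = 4 ∨ PySem.Int.mod a 10 = 5 ∨
               PySem.Int.mod a 10 = 6 ∨ PySem.Int.mod a 10 = 7 ∨ PySem.Int.mod a 10 = 8 ∨
               PySem.Int.mod a 10 = 9 := by omega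
        rcases hc with h' | h' | h' | h' | h' | h' | h' | h' | h' | h' <;>
          rw [h'] at hz hcont ⊢ <;>
          first | rfl | (exfalso; revert hz; decide) | (exfalso; revert hcont; decide)
      simp [hz]
      exact fun hdvd => absurd ((PySem.Int.mod_eq_zero_iff_dvd a 10).1 hd0) hdvd
    · have hd0 : ¬ PySem.Int.mod a 10 = 0 := by
        intro h'
        apply hz
        rw [hs0, h']
        decide
      have hs0pos : 1 ≤ s0 := by
        have := swapOpt_mem hso s0 (by simp)
        omega
      have hfold : (s0 :: m').foldl (fun t d => t * 10 + d) 0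
          = m'.foldl (fun t d => t * 10 + d) s0 := by
        simp [List.foldl]
      have htemp : 1 ≤ m'.foldl (fun t d => t * 10 + d) s0 :=
        foldl_pos m' s0 hs0pos
          (fun x hx => by have := swapOpt_mem hso x (by simp [hx]); omega)
      rw [hfold] at hrot
      simp only [hz, if_false, hd0, ne_eq, not_false_iff, if_true, hrot, hfold]
      have hmem : PySem.Set.contains S (m'.foldl (fun t d => t * 10 + d) s0)
          = decide (m'.foldl (fun t d => t * 10 + d) s0 < a) := by
        by_cases hlt : m'.foldl (fun t d => t * 10 + d) s0 < a
        · rw [(hS _).2 ⟨htemp, hlt⟩]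
          simp [hlt]
        · have hne : PySem.Set.contains S (m'.foldl (fun t d => t * 10 + d) s0) ≠ true :=
            fun hc => hlt ((hS _).1 hc).2
          simp only [ne_eq, Bool.not_eq_true] at hne
          rw [hne]
          simp [hlt]
      rw [hmem]
      by_cases hlt : m'.foldl (fun t d => t * 10 + d) s0 < a <;> simp [hlt]

theorem contains_iff_mem (S : PySem.Set Int) (x : Int) :
    PySem.Set.contains S x = true ↔ x ∈ S := by
  simp [PySem.Set.contains]

theorem loop_eq (k : Nat) : ∀ (a b : Int), (b - a).toNat = k → 1 ≤ a →
    ∀ (S : PySem.Set Int) (res : List (List Int)),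
    (∀ x : Int, PySem.Set.contains S x = true ↔ 1 ≤ x ∧ x < a) →
    ((PySem.List.pyRange a b 1).foldl confusingNumStep (S, res)).2
      = (PySem.List.pyRange a b 1).foldl altStep res := by
  induction k using Nat.strong_induction_on with
  | _ k ih =>
    intro a b hk ha S res hS
    by_cases hab : a < b
    · rw [PySem.List.pyRange_one_cons hab]
      simp only [List.foldl_cons]
      rw [step_eq a ha S res hS]
      apply ih (b - (a + 1)).toNat (by omega) (a + 1) b rfl (by omega)
      intro x
      rw [contains_iff_mem, PySem.Set.mem_add]
      constructor
      · rintro (hx | rfl)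
        · have := (hS x).1 ((contains_iff_mem S x).2 hx)
          omega
        · omega
      · intro hx
        by_cases hxa : x = a
        · right; exact hxa
        · left
          exact (contains_iff_mem S x).1 ((hS x).2 ⟨hx.1, by omega⟩)
    · rw [PySem.List.pyRange_one_eq_nil (by omega)]
      simp

-- ---- B-side: candidates, rotation without check, and the level loop ----

def goodD (d : Int) : Bool := d == 0 || d == 1 || d == 6 || d == 8 || d == 9

-- 'all digits of m are rotatable' (true on m ≤ 0)
def goodDigits (m : Int) : Bool :=
  if h : 0 < m then goodD (PySem.Int.mod m 10) && goodDigits (PySem.Int.floordiv m 10)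
  else true
termination_by m.toNat
decreasing_by
  rw [PySem.Int.floordiv_eq_ediv_of_pos (by norm_num)]
  omega

def pB (num : Int) : Bool := decide (PySem.Int.mod num 10 ≠ 0) && decide (rotBAux num 0 < num)

def fB (num : Int) : List Int := [rotBAux num 0, num]

theorem mod_eq_emod (m : Int) : PySem.Int.mod m 10 = m % 10 := by
  simp [PySem.Int.mod, Int.fmod_eq_emod]

theorem goodDigits_pos {m : Int} (h : 0 < m) :
    goodDigits m = (goodD (m % 10) && goodDigits (m / 10)) := by
  rw [goodDigits, dif_pos h, mod_eq_emod, PySem.Int.floordiv_eq_ediv_of_pos (by norm_num)]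

theorem goodDigits_nonpos {m : Int} (h : ¬ 0 < m) : goodDigits m = true := by
  rw [goodDigits, dif_neg h]

theorem goodD_iff (d : Int) : goodD d = true ↔ (d = 0 ∨ d = 1 ∨ d = 6 ∨ d = 8 ∨ d = 9) := by
  simp [goodD]
  tauto

theorem good_small {x : Int} (h0 : 0 ≤ x) (h10 : x < 10) :
    (goodDigits x = true ↔ (x = 0 ∨ x = 1 ∨ x = 6 ∨ x = 8 ∨ x = 9)) := by
  by_cases hx : 0 < x
  · rw [goodDigits_pos hx]
    have hm : x % 10 = x := by omega
    have hd : x / 10 = 0 := by omega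
    rw [hm, hd, goodDigits_nonpos (by norm_num), Bool.and_true, goodD_iff]
  · have : x = 0 := by omega
    subst this
    simp [goodDigits_nonpos hx]

theorem good_decomp {x : Int} (h : 10 ≤ x) :
    goodDigits x = true ↔ (goodD (x % 10) = true ∧ goodDigits (x / 10) = true) := by
  rw [goodDigits_pos (by omega), Bool.and_eq_true]

-- rotateAux is rotBAux guarded by digit validity
theorem rotateAux_good (k : Nat) : ∀ (m : Int), m.toNat = k → ∀ rot,
    rotateAux m rot = if goodDigits m then some (rotBAux m rot) else none := by
  induction k using Nat.strong_induction_on with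
  | _ k ih =>
    intro m hk rot
    by_cases h : 0 < m
    · have h0 : 0 ≤ PySem.Int.mod m 10 := PySem.Int.mod_nonneg m (by norm_num)
      have h10 : PySem.Int.mod m 10 < 10 := PySem.Int.mod_lt m (by norm_num)
      have hfd : (PySem.Int.floordiv m 10).toNat < k := by
        rw [PySem.Int.floordiv_eq_ediv_of_pos (by norm_num)]
        omega
      rw [rotateAux, rotBAux, goodDigits, dif_pos h]
      simp only [h, if_true]
      by_cases hbad : PySem.Int.mod m 10 = 2 ∨ PySem.Int.mod m 10 = 3 ∨
          PySem.Int.mod m 10 = 4 ∨ PySem.Int.mod m 10 = 5 ∨ PySem.Int.mod m 10 = 7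
      · have hg : goodD (PySem.Int.mod m 10) = false := by
          rw [Bool.eq_false_iff]
          intro hc
          rw [goodD_iff] at hc
          omega
        rw [if_pos hbad, hg]
        simp
      · have hg : goodD (PySem.Int.mod m 10) = true := by
          rw [goodD_iff]
          omega
        rw [if_neg hbad, ih _ hfd _ rfl, hg]
        simp
    · rw [rotateAux, rotBAux, goodDigits_nonpos h]
      simp [h]

theorem rotate_eq (num : Int) :
    rotate num = if goodDigits num then some (rotBAux num 0) else none :=
  rotateAux_good num.toNat num rfl 0

-- the scan step in filter/map form
theorem altStep_eq (res : List (List Int)) (num : Int) :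
    altStep res num = if goodDigits num && pB num then res ++ [fB num] else res := by
  unfold altStep
  rw [rotate_eq]
  by_cases hg : goodDigits num = true
  · rw [hg, if_pos rfl]
    by_cases h1 : PySem.Int.mod num 10 ≠ 0 <;>
      by_cases h2 : rotBAux num 0 < num <;>
      simp [h1, h2, pB, fB, hg]
  · rw [Bool.not_eq_true] at hg
    rw [hg]
    simp [pB]

theorem scan_filter : ∀ (l : List Int) (res : List (List Int)),
    l.foldl altStep res = res ++ ((l.filter (fun x => goodDigits x && pB x)).map fB) := by
  intro l
  induction l with
  | nil => intro res; simp
  | cons a t ih =>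
    intro res
    rw [List.foldl_cons, altStep_eq, ih, List.filter_cons]
    by_cases h : (goodDigits a && pB a) = true <;> simp [h]

theorem processLevel_eq : ∀ (level : List Int) (res : List (List Int)),
    processLevel res level = res ++ ((level.filter pB).map fB) := by
  intro level
  induction level with
  | nil => intro res; simp [processLevel]
  | cons a t ih =>
    intro res
    unfold processLevel at ih ⊢
    rw [List.foldl_cons, List.filter_cons]
    by_cases h : PySem.Int.mod a 10 ≠ 0 ∧ rotBAux a 0 < a
    · rw [if_pos h, ih]
      have hpb : pB a = true := by
        simp only [pB, Bool.and_eq_true, decide_eq_true_eq]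
        exact h
      simp [hpb, fB]
    · rw [if_neg h, ih]
      have hpb : pB a = false := by
        rw [Bool.eq_false_iff]
        intro hc
        simp only [pB, Bool.and_eq_true, decide_eq_true_eq] at hc
        exact h hc
      simp [hpb]

-- two strictly increasing integer lists with the same members are equal
theorem sorted_ext : ∀ (l1 l2 : List Int), l1.Pairwise (· < ·) → l2.Pairwise (· < ·) →
    (∀ x : Int, x ∈ l1 ↔ x ∈ l2) → l1 = l2 := by
  intro l1
  induction l1 with
  | nil =>
    intro l2 _ _ hmem
    cases l2 with
    | nil => rfl
    | cons b t2 => exact absurd ((hmem b).2 (by simp)) (by simp)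
  | cons a t1 ih =>
    intro l2 h1 h2 hmem
    cases l2 with
    | nil => exact absurd ((hmem a).1 (by simp)) (by simp)
    | cons b t2 =>
      obtain ⟨ha1, ht1⟩ := List.pairwise_cons.1 h1
      obtain ⟨hb2, ht2⟩ := List.pairwise_cons.1 h2
      have hab : a = b := by
        rcases List.mem_cons.1 ((hmem a).1 (by simp)) with h | h
        · exact h
        · rcases List.mem_cons.1 ((hmem b).2 (by simp)) with h' | h'
          · exact h'.symm
          · have := hb2 a h
            have := ha1 b h'
            omega
      subst hab
      congr 1
      apply ih t2 ht1 ht2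
      intro x
      constructor
      · intro hx
        rcases List.mem_cons.1 ((hmem x).1 (by simp [hx])) with h | h
        · subst h; exact absurd (ha1 x hx) (by omega)
        · exact h
      · intro hx
        rcases List.mem_cons.1 ((hmem x).2 (by simp [hx])) with h | h
        · subst h; exact absurd (hb2 x hx) (by omega)
        · exact h

-- membership in one parent's children
theorem mem_children (n num x : Int) :
    (x ∈ ([0, 1, 6, 8, 9] : List Int).filterMap
        (fun d => if num * 10 + d ≤ n then some (num * 10 + d) else none))
      ↔ ∃ d : Int, (d = 0 ∨ d = 1 ∨ d = 6 ∨ d = 8 ∨ d = 9) ∧ x = num * 10 + d ∧ x ≤ n := by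
  rw [List.mem_filterMap]
  constructor
  · rintro ⟨d, hd, hfd⟩
    split at hfd
    · rename_i hle
      rw [Option.some_inj] at hfd
      refine ⟨d, by simpa using hd, hfd.symm, by omega⟩
    · exact absurd hfd (by simp)
  · rintro ⟨d, hd, rfl, hle⟩
    exact ⟨d, by simp; omega, by rw [if_pos hle]⟩

theorem mem_nextLevel (n p : Int) (hp : 1 ≤ p) (level : List Int)
    (hmem : ∀ x : Int, x ∈ level ↔ (goodDigits x = true ∧ p ≤ x ∧ x < 10 * p ∧ x ≤ n)) :
    ∀ x : Int, x ∈ nextLevel n level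
      ↔ (goodDigits x = true ∧ 10 * p ≤ x ∧ x < 10 * (10 * p) ∧ x ≤ n) := by
  intro x
  unfold nextLevel
  rw [List.mem_flatMap]
  constructor
  · rintro ⟨num, hnum, hx⟩
    obtain ⟨hg, hlo, hhi, hle⟩ := (hmem num).1 hnum
    obtain ⟨d, hd, rfl, hxn⟩ := (mem_children n num x).1 hx
    have hmod : (num * 10 + d) % 10 = d := by omega
    have hdiv : (num * 10 + d) / 10 = num := by omega
    refine ⟨?_, by omega, by omega, hxn⟩
    rw [good_decomp (by omega), hmod, hdiv]
    exact ⟨(goodD_iff d).2 hd, hg⟩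
  · rintro ⟨hg, hlo, hhi, hle⟩
    have hx10 : 10 ≤ x := by omega
    obtain ⟨hgd, hgq⟩ := (good_decomp hx10).1 hg
    have hd := (goodD_iff (x % 10)).1 hgd
    refine ⟨x / 10, (hmem (x / 10)).2 ⟨hgq, by omega, by omega, by omega⟩, ?_⟩
    rw [mem_children]
    exact ⟨x % 10, hd, by omega, hle⟩

theorem pairwise_nextLevel (n p : Int) (level : List Int)
    (hpw : level.Pairwise (· < ·))
    (hpos : ∀ x ∈ level, 1 ≤ x) :
    (nextLevel n level).Pairwise (· < ·) := by
  unfold nextLevel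
  rw [List.pairwise_flatMap]
  constructor
  · intro num _
    rw [List.pairwise_filterMap]
    have hlt : ([0, 1, 6, 8, 9] : List Int).Pairwise (· < ·) := by decide
    refine hlt.imp ?_
    intro d d' hdd b hb b' hb'
    split at hb
    · split at hb'
      · rw [Option.some_inj] at hb hb'
        omega
      · exact absurd hb' (by simp)
    · exact absurd hb (by simp)
  · refine hpw.imp_of_mem ?_
    intro a b ha hb hab x hx y hy
    have h1 := hpos a ha
    obtain ⟨d, hd, rfl, -⟩ := (mem_children n a x).1 hx
    obtain ⟨d', hd', rfl, -⟩ := (mem_children n b y).1 hy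
    omega

-- the level loop produces exactly the scan's pairs for candidates ≥ p
theorem loopB (n : Int) (k : Nat) : ∀ (p : Int) (hp : 1 ≤ p), (n + 1 - p).toNat = k →
    ∀ (level : List Int) (res : List (List Int)),
    level.Pairwise (· < ·) →
    (∀ x : Int, x ∈ level ↔ (goodDigits x = true ∧ p ≤ x ∧ x < 10 * p ∧ x ≤ n)) →
    levelLoop n p hp level res
      = res ++ (((PySem.List.pyRange 1 (n + 1) 1).filter
          (fun x => goodDigits x && pB x && decide (p ≤ x))).map fB) := by
  induction k using Nat.strong_induction_on with
  | _ k ih =>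
    intro p hp hk level res hpw hmem
    by_cases h : p ≤ n
    · rw [levelLoop, dif_pos h]
      have hpos : ∀ x ∈ level, 1 ≤ x := fun x hx => by
        have := (hmem x).1 hx
        omega
      rw [ih (n + 1 - p * 10).toNat (by omega) (p * 10) (by omega) rfl
            (nextLevel n level) (processLevel res level)
            (pairwise_nextLevel n p level hpw hpos)
            (by
              have := mem_nextLevel n p hp level hmem
              intro x
              rw [this x]
              constructor
              · rintro ⟨hg, h1, h2, h3⟩; exact ⟨hg, by omega, by omega, h3⟩
              · rintro ⟨hg, h1, h2, h3⟩; exact ⟨hg, by omega, by omega, h3⟩)]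
      rw [processLevel_eq, List.append_assoc]
      congr 1
      rw [← List.map_append]
      congr 1
      apply sorted_ext
      · rw [List.pairwise_append]
        refine ⟨hpw.filter pB, (PySem.List.pairwise_lt_pyRange_one 1 (n + 1)).filter _, ?_⟩
        intro a ha b hb
        have ha' := (hmem a).1 (List.mem_of_mem_filter ha)
        have hb' := List.of_mem_filter hb
        simp only [Bool.and_eq_true, decide_eq_true_eq] at hb'
        omega
      · exact (PySem.List.pairwise_lt_pyRange_one 1 (n + 1)).filter _
      · intro x
        simp only [List.mem_append, List.mem_filter, PySem.List.mem_pyRange_one,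
          Bool.and_eq_true, decide_eq_true_eq, hmem x]
        constructor
        · rintro (⟨⟨hg, h1, h2, h3⟩, hpb⟩ | ⟨⟨h1, h2⟩, ⟨⟨hg, hpb⟩, h3⟩⟩)
          · exact ⟨⟨by omega, by omega⟩, ⟨hg, hpb⟩, by omega⟩
          · exact ⟨⟨h1, h2⟩, ⟨hg, hpb⟩, by omega⟩
        · rintro ⟨⟨h1, h2⟩, ⟨hg, hpb⟩, h3⟩
          by_cases hx : x < 10 * p
          · exact Or.inl ⟨⟨hg, h3, hx, by omega⟩, hpb⟩
          · exact Or.inr ⟨⟨h1, h2⟩, ⟨⟨hg, hpb⟩, by omega⟩⟩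
    · rw [levelLoop, dif_neg h]
      have : ((PySem.List.pyRange 1 (n + 1) 1).filter
          (fun x => goodDigits x && pB x && decide (p ≤ x))) = [] := by
        rw [List.filter_eq_nil_iff]
        intro a ha
        have := PySem.List.mem_pyRange_one.1 ha
        simp only [Bool.and_eq_true, decide_eq_true_eq, not_and]
        intro _
        omega
      rw [this]
      simp

-- ===== VERDICT (by name: the statement is the Claim_ definition above) =====
theorem confusingNum_spec : Claim_equal_confusingNum := by
  intro n _
  unfold Spec_confusingNum
  have hA : confusingNum n
      = ((PySem.List.pyRange 1 (n + 1) 1).filter (fun x => goodDigits x && pB x)).map fB := by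
    unfold confusingNum
    rw [loop_eq (n + 1 - 1).toNat 1 (n + 1) rfl le_rfl _ _
        (fun x => by
          constructor
          · intro h
            exact absurd h (by simp [PySem.Set.contains, PySem.Set.empty])
          · omega),
      scan_filter]
    simp
  have hB : confusingNum_alt n
      = ((PySem.List.pyRange 1 (n + 1) 1).filter
          (fun x => goodDigits x && pB x && decide (1 ≤ x))).map fB := by
    unfold confusingNum_alt
    rw [loopB n (n + 1 - 1).toNat 1 (by norm_num) rfl _ []
        (by
          have : ([1, 6, 8, 9] : List Int).Pairwise (· < ·) := by decide
          exact this.filter _)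
        (fun x => by
          rw [List.mem_filter]
          constructor
          · rintro ⟨hx, hle⟩
            simp only [decide_eq_true_eq] at hle
            have hx' : x = 1 ∨ x = 6 ∨ x = 8 ∨ x = 9 := by simpa using hx
            refine ⟨(good_small (by omega) (by omega)).2 (by omega), by omega, by omega, hle⟩
          · rintro ⟨hg, h1, h2, h3⟩
            have := (good_small (by omega) (by omega)).1 hg
            refine ⟨by simp; omega, by simp; omega⟩)]
    simp
  rw [hA, hB]
  congr 1
  apply List.filter_congr
  intro x hx
  have := PySem.List.mem_pyRange_one.1 hx
  have h1 : decide ((1 : Int) ≤ x) = true := by simp; omega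
  rw [h1, Bool.and_true]
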